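-- pv_equiv track=rewrite | github.com/joshz123/Interview_Prep_Questions | StudentHeight.py | smallIndex
-- ===== SOURCE A (Python) =====
-- def smallIndex(array,num):
--     newlist = []
--     for i in array:
--         if num<i:
--             newlist.append(i)
--     try:
--         return array.index(max(newlist))
--     except:
--         return -1
-- ===== SOURCE B (Python) =====
-- def smallIndex(array, num):
--     best_val = None
--     best_idx = -1
--     for idx, i in enumerate(array):
--         if i > num and (best_val is None or i > best_val):
--             best_val = i
--             best_idx = idx
--     return best_idx
-- ===== Notes on version B (the rewrite author's own statement) =====
-- stated objective: alternative
-- what changed: Replaces A's three-pass structure (build a filtered list, max() over it, array.index() scan) by one forward pass over enumerate(array) maintaining best_val/best_idx with a strict '>' update so the first occurrence of the maximum wins.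
import Mathlib
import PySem

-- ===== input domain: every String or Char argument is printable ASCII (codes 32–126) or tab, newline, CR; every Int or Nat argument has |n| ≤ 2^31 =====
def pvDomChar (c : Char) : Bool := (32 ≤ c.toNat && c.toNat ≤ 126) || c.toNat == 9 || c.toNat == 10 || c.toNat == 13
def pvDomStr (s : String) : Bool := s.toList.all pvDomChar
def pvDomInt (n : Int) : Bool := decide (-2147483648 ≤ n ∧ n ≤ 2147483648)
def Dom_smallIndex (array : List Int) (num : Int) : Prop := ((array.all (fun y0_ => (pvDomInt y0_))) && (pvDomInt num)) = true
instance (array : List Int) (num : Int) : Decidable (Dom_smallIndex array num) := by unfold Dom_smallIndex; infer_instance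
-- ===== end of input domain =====

-- B replaces A's three passes (filtered list, max(), array.index()) by one forward pass with maintained best state (objective: alternative single-pass decomposition, O(1) extra space).

-- ===== PORT A =====
def smallIndex (array : List Int) (num : Int) : Int :=
  let newlist := array.foldl (fun acc i => if num < i then acc ++ [i] else acc) ([] : List Int)
  match PySem.List.max? newlist (fun y => y) with
  | none => -1            -- max([]) raises ValueError, caught by except
  | some m =>
    match PySem.List.index? array m with
    | some j => (j : Int)
    | none => -1          -- .index ValueError would also be caught (never happens)

-- ===== PORT B =====
-- state = (best_val : Option Int, best_idx : Int)
def pvStepB (num : Int) (st : Option Int × Int) (p : Int × Int) : Option Int × Int :=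
  match st.1 with
  | none => if num < p.2 then (some p.2, p.1) else st
  | some bv => if num < p.2 ∧ bv < p.2 then (some p.2, p.1) else st

def smallIndex_alt (array : List Int) (num : Int) : Int :=
  ((PySem.List.enumerate array 0).foldl (pvStepB num) (none, -1)).2

-- ===== PRECONDITION & SPEC =====
def Spec_smallIndex (array : List Int) (num : Int) (out : Int) : Prop := out = smallIndex_alt array num
instance (array : List Int) (num : Int) (out : Int) : Decidable (Spec_smallIndex array num out) := by unfold Spec_smallIndex; infer_instance

-- ===== CLAIM (what is proved, stated in full; the proofs are below) =====
def Claim_equal_smallIndex : Prop := ∀ (array : List Int) (num : Int), Dom_smallIndex array num → Spec_smallIndex array num (smallIndex array num)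

-- ===== LEMMAS AND PROOFS =====

-- common characterization: value and first index of the maximal element among those > num
def pvAux (num : Int) : List Int → Option (Int × Nat)
  | [] => none
  | x :: xs =>
    match pvAux num xs with
    | none => if num < x then some (x, 0) else none
    | some (v, j) => if num < x ∧ v ≤ x then some (x, 0) else some (v, j + 1)

lemma pvAux_spec (num : Int) (xs : List Int) :
    match pvAux num xs with
    | none => ∀ y ∈ xs, ¬ num < y
    | some (v, j) => num < v ∧ (∀ y ∈ xs, num < y → y ≤ v) ∧ PySem.List.index? xs v = some j := by
  induction xs with
  | nil => simp [pvAux]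
  | cons x xs ih =>
    rcases h : pvAux num xs with _ | ⟨v, j⟩ <;> rw [h] at ih <;> simp only [pvAux, h]
    · by_cases hx : num < x
      · simp only [if_pos hx]
        refine ⟨hx, ?_, PySem.List.index?_cons_self x xs⟩
        intro y hy h'
        rcases List.mem_cons.mp hy with rfl | hy
        · exact le_refl y
        · exact absurd h' (ih y hy)
      · simp only [if_neg hx]
        intro y hy
        rcases List.mem_cons.mp hy with rfl | hy
        · exact hx
        · exact ih y hy
    · obtain ⟨hv, hmax, hidx⟩ := ih
      by_cases hx : num < x ∧ v ≤ x
      · simp only [if_pos hx]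
        refine ⟨hx.1, ?_, PySem.List.index?_cons_self x xs⟩
        intro y hy h'
        rcases List.mem_cons.mp hy with rfl | hy
        · exact le_refl y
        · exact le_trans (hmax y hy h') hx.2
      · simp only [if_neg hx]
        have hne : x ≠ v := by rintro rfl; exact hx ⟨hv, le_refl x⟩
        refine ⟨hv, ?_, ?_⟩
        · intro y hy h'
          rcases List.mem_cons.mp hy with rfl | hy
          · exact le_of_not_gt fun hge => hx ⟨h', le_of_lt hge⟩
          · exact hmax y hy h'
        · rw [PySem.List.index?_cons_of_ne xs hne, hidx]; rfl

-- B's fold from a some-state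
lemma go_some (num : Int) (xs : List Int) : ∀ (s bv bi : Int),
    (PySem.List.enumerate xs s).foldl (pvStepB num) (some bv, bi) =
      match pvAux num xs with
      | some (v, j) => if bv < v then (some v, s + (j : Int)) else (some bv, bi)
      | none => (some bv, bi) := by
  induction xs with
  | nil => intro s bv bi; simp [pvAux, PySem.List.enumerate_nil]
  | cons x xs ih =>
    intro s bv bi
    rw [PySem.List.enumerate_cons]
    simp only [List.foldl_cons, pvStepB]
    have hv : match pvAux num xs with
      | none => True
      | some (v, j) => num < v := by
      have := pvAux_spec num xs
      rcases h : pvAux num xs with _ | ⟨v, j⟩ <;> rw [h] at this <;> simp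
      exact this.1
    rcases h : pvAux num xs with _ | ⟨v, j⟩ <;> rw [h] at hv <;> simp only [pvAux, h]
    · by_cases hx : num < x <;> by_cases hbv : bv < x <;>
        simp [hx, hbv, ih, h] <;> (try split_ifs) <;> (try simp_all) <;> (try push_cast) <;> (try intro _) <;> (try omega)
    · by_cases hx : num < x <;> by_cases hbv : bv < x <;> by_cases hvx : v ≤ x <;>
        simp [hx, hbv, hvx, ih, h] <;> (try split_ifs) <;> (try simp_all) <;> (try push_cast) <;> (try intro _) <;> (try omega)

-- B's fold from the initial none-state
lemma go_none (num : Int) (xs : List Int) : ∀ (s bi : Int),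
    (PySem.List.enumerate xs s).foldl (pvStepB num) (none, bi) =
      match pvAux num xs with
      | some (v, j) => (some v, s + (j : Int))
      | none => (none, bi) := by
  cases xs with
  | nil => intro s bi; simp [pvAux, PySem.List.enumerate_nil]
  | cons x xs =>
    intro s bi
    rw [PySem.List.enumerate_cons]
    simp only [List.foldl_cons, pvStepB]
    have hv : match pvAux num xs with
      | none => True
      | some (v, j) => num < v := by
      have := pvAux_spec num xs
      rcases h : pvAux num xs with _ | ⟨v, j⟩ <;> rw [h] at this <;> simp
      exact this.1
    rcases h : pvAux num xs with _ | ⟨v, j⟩ <;> rw [h] at hv <;> simp only [pvAux, h]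
    · by_cases hx : num < x <;>
        simp [hx, go_some, go_none, h] <;> (try split_ifs) <;> (try simp_all) <;> (try push_cast) <;> (try intro _) <;> (try omega)
    · by_cases hx : num < x <;> by_cases hvx : v ≤ x <;>
        simp [hx, hvx, go_some, go_none, h] <;> (try split_ifs) <;> (try simp_all) <;> (try push_cast) <;> (try intro _) <;> (try omega)

-- ===== VERDICT (by name: the statement is the Claim_ definition above) =====
theorem smallIndex_spec : Claim_equal_smallIndex := by
  intro array num _
  unfold Spec_smallIndex smallIndex smallIndex_alt
  rw [PySem.List.foldl_append_ite_eq_filter (fun i => num < i) array ([] : List Int),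
      List.nil_append, go_none]
  have hspec := pvAux_spec num array
  rcases h : pvAux num array with _ | ⟨v, j⟩ <;> rw [h] at hspec
  · have hF : array.filter (fun i => decide (num < i)) = [] := by
      rw [List.filter_eq_nil_iff]; intro a ha; simpa using hspec a ha
    have hmax0 : PySem.List.max? ([] : List Int) (fun y => y) = none :=
      (PySem.List.max?_eq_none_iff ([] : List Int) (fun y => y)).mpr rfl
    simp only [hF, hmax0]
  · obtain ⟨hvnum, hmax, hidx⟩ := hspec
    have hvmem : v ∈ array := by
      rw [← PySem.List.index?_isSome_iff, hidx]; rfl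
    have hvF : v ∈ array.filter (fun i => decide (num < i)) :=
      List.mem_filter.mpr ⟨hvmem, by simpa using hvnum⟩
    obtain ⟨m, hm⟩ : ∃ m, PySem.List.max? (array.filter (fun i => decide (num < i))) (fun y => y) = some m := by
      rcases h' : PySem.List.max? (array.filter (fun i => decide (num < i))) (fun y => y) with _ | m
      · rw [PySem.List.max?_eq_none_iff] at h'
        rw [h'] at hvF; exact absurd hvF (List.not_mem_nil)
      · exact ⟨m, rfl⟩
    have hmF := PySem.List.max?_mem hm
    have h1 : v ≤ m := PySem.List.max?_isMax hm v hvF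
    obtain ⟨hmmem, hmnum⟩ := List.mem_filter.mp hmF
    have h2 : m ≤ v := hmax m hmmem (by simpa using hmnum)
    have hmv : m = v := le_antisymm h2 h1
    rw [hmv] at hm
    simp only [hm, hidx]
    simp
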